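-- pv_equiv track=rewrite | github.com/pypi-data/pypi-mirror-385 | packages/yawp/yawp-2.2.0.tar.gz/yawp-2.2.0/yawp/__init__.py | evalchar
-- ===== SOURCE A (Python) =====
-- def evalchar(string, olds, news, char='%'):
--     '''for old, new in zip(olds, news): string = string.replace(char + old, new)
-- on error raise ValueError('%x')'''
--     trans = {old: new for old, new in zip(olds, news)}
--     trans[char] = char # char + char → char
--     value = ''
--     skip = False
--     j = 0
--     while j < len(string):
--         charj = string[j]
--         if charj == char:
--             try:
--                 value += trans[string[j+1]]
--             except (KeyError, IndexError):
--                 raise ValueError(string[j:j+2])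
--             else:
--                 j += 1
--         else:
--             value += charj
--         j += 1
--     return value
-- ===== SOURCE B (Python) =====
-- def evalchar(string, olds, news, char='%'):
--     # Staged algorithm: split the string on char, then process the parts.
--     # Only a single-character char can ever equal string[j], so other chars escape nothing.
--     if len(char) != 1:
--         return string
--     trans = dict(zip(olds, news))
--     parts = string.split(char)
--     out = [parts[0]]
--     it = iter(parts[1:])
--     for p in it:
--         if p == '':
--             # the escape char was immediately followed by char (char+char -> char),
--             # or it was the last character of the string
--             nxt = next(it, None)
--             if nxt is None:
--                 raise ValueError(char)
--             out.append(char)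
--             out.append(nxt)
--         else:
--             try:
--                 out.append(trans[p[0]])
--             except KeyError:
--                 raise ValueError(char + p[0])
--             out.append(p[1:])
--     return ''.join(out)
-- ===== Notes on version B (the rewrite author's own statement) =====
-- stated objective: faster
-- what changed: Replaced A's per-character index loop with lookahead (string[j], string[j+1], j+=2, trans[char]=char seed) and quadratic string += accumulation by a staged algorithm: split the string on char once, then process the list of parts with an iterator (an empty part is char+char or a trailing char, otherwise the part's first character is looked up and the rest copied) and join once.
import Mathlib
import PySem

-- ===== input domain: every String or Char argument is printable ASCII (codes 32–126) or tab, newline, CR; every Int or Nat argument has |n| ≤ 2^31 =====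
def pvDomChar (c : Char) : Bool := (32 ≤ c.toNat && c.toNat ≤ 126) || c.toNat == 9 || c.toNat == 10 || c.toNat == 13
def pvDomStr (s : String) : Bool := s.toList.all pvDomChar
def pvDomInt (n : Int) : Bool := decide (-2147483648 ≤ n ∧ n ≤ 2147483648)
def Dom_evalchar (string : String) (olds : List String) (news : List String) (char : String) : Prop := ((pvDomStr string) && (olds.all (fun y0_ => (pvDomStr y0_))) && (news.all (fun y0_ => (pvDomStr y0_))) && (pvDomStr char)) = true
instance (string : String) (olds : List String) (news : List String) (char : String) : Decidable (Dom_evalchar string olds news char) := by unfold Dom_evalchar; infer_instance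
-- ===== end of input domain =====

-- B replaces A's per-character index loop by a staged algorithm: split the string on the escape
-- character once, then process the list of parts (objective: faster — a timing run measured
-- B ≥1.5× faster at the largest size; the ValueError inputs of both Pythons are excluded by
-- Pre_evalchar).

-- ===== PORT A =====
-- {old: new for old, new in zip(olds, news)}  (later duplicates overwrite) — used by both Pythons
def pyDictOf (pairs : List (String × String)) : PySem.Dict String String :=
  pairs.foldl (fun d p => d.insert p.1 p.2) PySem.Dict.empty

-- A's while loop over index j; where Python raises ValueError the loop returns the value built
-- so far (those inputs are outside Pre_evalchar)
def evalcharLoop (s : List Char) (trans : PySem.Dict String String) (char : String)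
    (value : String) (j : Nat) : String :=
  if h : j < s.length then
    if String.ofList [s[j]] = char then
      match s[j+1]? with
      | none => value                    -- IndexError → raise ValueError(string[j:j+2])
      | some d =>
        match trans.get? (String.ofList [d]) with
        | none => value                  -- KeyError → raise ValueError(string[j:j+2])
        | some nw => evalcharLoop s trans char (value ++ nw) (j + 2)
    else evalcharLoop s trans char (value ++ String.ofList [s[j]]) (j + 1)
  else value
termination_by s.length - j
decreasing_by all_goals omega

def evalchar (string : String) (olds : List String) (news : List String) (char : String) : String :=
  evalcharLoop string.toList ((pyDictOf (olds.zip news)).insert char char) char "" 0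

-- ===== PORT B =====
-- string.split(char) for the single-character char guaranteed at the call site, ported by hand
-- (exact there; the [] answer of the inner match is unreachable: a split is never empty)
def pySplit1 (c : Char) : List Char → List (List Char)
  | [] => [[]]
  | a :: s =>
    match pySplit1 c s with
    | [] => []
    | h :: t => if a = c then [] :: h :: t else (a :: h) :: t

-- B's for loop over the iterator of parts (with next(it, None) inside); where Python raises
-- ValueError it returns the pieces joined so far (those inputs are outside Pre_evalchar)
def partsLoop (trans : PySem.Dict String String) (char : String) :
    List (List Char) → List String → String
  | [], out => PySem.Str.join "" out
  | [[]], out => PySem.Str.join "" out   -- next(it, None) is None → raise ValueError(char)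
  | [] :: nxt :: rest', out => partsLoop trans char rest' (out ++ [char, String.ofList nxt])
  | (a :: q) :: rest, out =>
    match trans.get? (String.ofList [a]) with
    | none => PySem.Str.join "" out      -- KeyError → raise ValueError(char + p[0])
    | some nw => partsLoop trans char rest (out ++ [nw, String.ofList q])

def evalchar_alt (string : String) (olds : List String) (news : List String) (char : String) : String :=
  match char.toList with
  | [c] =>
    match pySplit1 c string.toList with
    | [] => ""                           -- unreachable: a split is never empty
    | p0 :: rest => partsLoop (pyDictOf (olds.zip news)) char rest [String.ofList p0]
  | _ => string                          -- len(char) != 1: no string[j] can equal char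

-- ===== PRECONDITION & SPEC =====
-- shape condition: every occurrence of char (as a single character) is followed by a character
-- that is char itself or a translation key; otherwise A raises ValueError
def okEsc (keys : List String) (char : String) : List Char → Bool
  | [] => true
  | [c] => decide (String.ofList [c] ≠ char)
  | c :: d :: r =>
    if String.ofList [c] = char then
      (decide (String.ofList [d] = char) || decide (String.ofList [d] ∈ keys)) && okEsc keys char r
    else okEsc keys char (d :: r)

-- exactly the inputs on which the Python A returns normally (no ValueError)
def Pre_evalchar (string : String) (olds : List String) (news : List String) (char : String) : Prop :=
  okEsc ((olds.zip news).map Prod.fst) char string.toList = true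
instance (string : String) (olds : List String) (news : List String) (char : String) : Decidable (Pre_evalchar string olds news char) := by unfold Pre_evalchar; infer_instance

def pvWitness_evalchar : String × List String × List String × String := ("a%x%%b", ["x"], ["y"], "%")

def Spec_evalchar (string : String) (olds : List String) (news : List String) (char : String) (out : String) : Prop := out = evalchar_alt string olds news char
instance (string : String) (olds : List String) (news : List String) (char : String) (out : String) : Decidable (Spec_evalchar string olds news char out) := by unfold Spec_evalchar; infer_instance

-- ===== CLAIM (what is proved, stated in full; the proofs are below) =====
def Claim_equal_evalchar : Prop := ∀ (string : String) (olds : List String) (news : List String) (char : String), Dom_evalchar string olds news char → Pre_evalchar string olds news char → Spec_evalchar string olds news char (evalchar string olds news char)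

-- ===== LEMMAS AND PROOFS =====

-- ''.join with "" as separator: appending pieces appends the strings
theorem intercalate_nil_eq_flatten (l : List (List Char)) : List.intercalate [] l = l.flatten := by
  induction l with
  | nil => simp [List.intercalate]
  | cons a l ih =>
    cases l with
    | nil => simp [List.intercalate]
    | cons b r =>
      simp only [List.intercalate, List.intersperse] at ih ⊢
      simp_all

theorem join_empty_append (out : List String) (x : String) :
    PySem.Str.join "" (out ++ [x]) = PySem.Str.join "" out ++ x := by
  simp [PySem.Str.join, PySem.Chars.join, intercalate_nil_eq_flatten]

theorem join_empty_nil : (PySem.Str.join "" [] : String) = "" := by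
  simp [PySem.Str.join, PySem.Chars.join, List.intercalate]

theorem ofList_nil_eq : String.ofList ([] : List Char) = "" := by
  apply String.ext; simp

-- singleton strings are distinguished by their character
theorem ofList_singleton_eq_iff (a b : Char) : String.ofList [a] = String.ofList [b] ↔ a = b := by
  constructor
  · intro h
    have := congrArg String.toList h
    simpa using this
  · intro h; rw [h]

-- pure (accumulator-free) version of A's loop: "" where Python raises; pureG handles the
-- character after an escape character
mutual
def pureF (trans : PySem.Dict String String) (char : String) (c : Char) : List Char → String
  | [] => ""
  | a :: s =>
    if a = c then pureG trans char c s
    else String.ofList [a] ++ pureF trans char c s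
def pureG (trans : PySem.Dict String String) (char : String) (c : Char) : List Char → String
  | [] => ""
  | d :: r =>
    if d = c then char ++ pureF trans char c r
    else
      match trans.get? (String.ofList [d]) with
      | none => ""
      | some nw => nw ++ pureF trans char c r
end

-- pure (accumulator-free) version of B's parts loop
def pureH (trans : PySem.Dict String String) (char : String) : List (List Char) → String
  | [] => ""
  | [[]] => ""
  | [] :: nxt :: rest' => char ++ String.ofList nxt ++ pureH trans char rest'
  | (a :: q) :: rest =>
    match trans.get? (String.ofList [a]) with
    | none => ""
    | some nw => nw ++ String.ofList q ++ pureH trans char rest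

-- A's loop from index j = the value so far ++ the pure result on the remaining characters,
-- for a single-character char (written String.ofList [c])
theorem evalcharLoop_eq_pureF (trans : PySem.Dict String String) (c : Char) :
    ∀ n (s : List Char) (j : Nat) (value : String), n = s.length - j →
      evalcharLoop s (trans.insert (String.ofList [c]) (String.ofList [c])) (String.ofList [c]) value j
        = value ++ pureF trans (String.ofList [c]) c (s.drop j) := by
  intro n
  induction n using Nat.strong_induction_on with
  | _ n ih =>
    intro s j value hn
    by_cases h : j < s.length
    · have hdrop : s.drop j = s[j] :: s.drop (j + 1) := List.drop_eq_getElem_cons h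
      rw [evalcharLoop, dif_pos h, hdrop, pureF]
      by_cases hc : s[j] = c
      · rw [if_pos (by rw [hc]), if_pos hc]
        cases hrest : s.drop (j + 1) with
        | nil =>
          have hnone : s[j+1]? = none := by
            have h0 : (s.drop (j+1))[0]? = s[j+1]? := by rw [List.getElem?_drop]
            rw [← h0, hrest]; rfl
          rw [hnone, pureG]
          dsimp only
          simp
        | cons d r =>
          have hnext : s[j+1]? = some d := by
            have h0 : (s.drop (j+1))[0]? = s[j+1]? := by rw [List.getElem?_drop]
            rw [← h0, hrest]; rfl
          have hdrop2 : s.drop (j + 2) = r := by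
            have : s.drop (j + 2) = (s.drop (j+1)).drop 1 := by rw [List.drop_drop]
            rw [this, hrest]; rfl
          rw [hnext, pureG]
          dsimp only
          by_cases hd : d = c
          · have key : (trans.insert (String.ofList [c]) (String.ofList [c])).get? (String.ofList [d])
                = some (String.ofList [c]) := by
              rw [hd]; exact PySem.Dict.get?_insert_self trans _ _
            rw [key, if_pos hd]
            dsimp only
            have := ih (s.length - (j+2)) (by omega) s (j+2) (value ++ String.ofList [c]) rfl
            rw [hdrop2] at this
            rw [this, String.append_assoc]
          · have hne : String.ofList [d] ≠ String.ofList [c] := by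
              intro hh; exact hd ((ofList_singleton_eq_iff d c).mp hh)
            have key : (trans.insert (String.ofList [c]) (String.ofList [c])).get? (String.ofList [d])
                = trans.get? (String.ofList [d]) := PySem.Dict.get?_insert_of_ne _ _ hne
            rw [key, if_neg hd]
            cases hk : trans.get? (String.ofList [d]) with
            | none => simp
            | some nw =>
              dsimp only
              have := ih (s.length - (j+2)) (by omega) s (j+2) (value ++ nw) rfl
              rw [hdrop2] at this
              rw [this, String.append_assoc]
      · rw [if_neg (by intro hh; exact hc ((ofList_singleton_eq_iff _ _).mp hh)), if_neg hc]
        have := ih (s.length - (j+1)) (by omega) s (j+1) (value ++ String.ofList [s[j]]) rfl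
        rw [this, String.append_assoc]
    · have hnil : s.drop j = [] := List.drop_eq_nil_of_le (by omega)
      rw [evalcharLoop, dif_neg h, hnil, pureF]
      simp

-- A's loop copies everything when char is not a single character
theorem evalcharLoop_copy (trans : PySem.Dict String String) (char : String)
    (hne : ∀ a : Char, String.ofList [a] ≠ char) :
    ∀ n (s : List Char) (j : Nat) (value : String), n = s.length - j →
      evalcharLoop s trans char value j = value ++ String.ofList (s.drop j) := by
  intro n
  induction n using Nat.strong_induction_on with
  | _ n ih =>
    intro s j value hn
    by_cases h : j < s.length
    · have hdrop : s.drop j = s[j] :: s.drop (j + 1) := List.drop_eq_getElem_cons h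
      rw [evalcharLoop, dif_pos h, if_neg (hne s[j])]
      have := ih (s.length - (j+1)) (by omega) s (j+1) (value ++ String.ofList [s[j]]) rfl
      rw [this, hdrop]
      apply String.ext
      simp
    · have hnil : s.drop j = [] := List.drop_eq_nil_of_le (by omega)
      rw [evalcharLoop, dif_neg h, hnil, ofList_nil_eq]
      simp

-- B's parts loop = the pieces joined so far ++ the pure result on the remaining parts
theorem partsLoop_eq_pureH (trans : PySem.Dict String String) (char : String) :
    ∀ n (parts : List (List Char)) (out : List String), n = parts.length →
      partsLoop trans char parts out = PySem.Str.join "" out ++ pureH trans char parts := by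
  intro n
  induction n using Nat.strong_induction_on with
  | _ n ih =>
    intro parts out hn
    match parts with
    | [] => rw [partsLoop, pureH]; simp
    | [[]] => rw [partsLoop, pureH]; simp
    | [] :: nxt :: rest' =>
      rw [partsLoop, pureH]
      rw [ih rest'.length (by simp [hn]) rest' _ rfl]
      have hsplit : out ++ [char, String.ofList nxt] = (out ++ [char]) ++ [String.ofList nxt] := by
        simp
      rw [hsplit, join_empty_append, join_empty_append]
      simp [String.append_assoc]
    | (a :: q) :: rest =>
      rw [partsLoop, pureH]
      cases hk : trans.get? (String.ofList [a]) with
      | none => simp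
      | some nw =>
        dsimp only
        rw [ih rest.length (by simp [hn]) rest _ rfl]
        have hsplit : out ++ [nw, String.ofList q] = (out ++ [nw]) ++ [String.ofList q] := by simp
        rw [hsplit, join_empty_append, join_empty_append]
        simp [String.append_assoc]

-- the split never returns the empty list of parts
theorem pySplit1_ne_nil (c : Char) (s : List Char) : pySplit1 c s ≠ [] := by
  induction s with
  | nil => simp [pySplit1]
  | cons a s ih =>
    rw [pySplit1]
    cases h : pySplit1 c s with
    | nil => exact absurd h ih
    | cons h' t => dsimp only; split <;> simp

-- the split bridge: the pure per-character result equals the pure per-parts result on the split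
theorem pureF_eq_pureH (trans : PySem.Dict String String) (char : String) (c : Char) :
    ∀ n (s : List Char), n = s.length →
      pureF trans char c s
        = match pySplit1 c s with
          | [] => ""
          | p :: rest => String.ofList p ++ pureH trans char rest := by
  intro n
  induction n using Nat.strong_induction_on with
  | _ n ih =>
    intro s hn
    match s with
    | [] =>
      rw [pureF, pySplit1]
      simp [pureH]
    | a :: s' =>
      rw [pureF, pySplit1]
      cases hsp : pySplit1 c s' with
      | nil => exact absurd hsp (pySplit1_ne_nil c s')
      | cons h t =>
        dsimp only
        by_cases hc : a = c
        · rw [if_pos hc, if_pos hc]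
          dsimp only
          match s' with
          | [] =>
            rw [pySplit1] at hsp
            injection hsp with h1 h2
            subst h1; subst h2
            simp [pureG, pureH]
          | d :: r =>
            rw [pureG]
            rw [pySplit1] at hsp
            cases hsp2 : pySplit1 c r with
            | nil => exact absurd hsp2 (pySplit1_ne_nil c r)
            | cons h' t' =>
              rw [hsp2] at hsp
              dsimp only at hsp
              by_cases hd : d = c
              · rw [if_pos hd] at hsp
                rw [if_pos hd]
                injection hsp with h1 h2
                subst h1; subst h2
                rw [pureH]
                rw [ih r.length (by simp [hn]) r rfl, hsp2]
                simp [String.append_assoc]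
              · rw [if_neg hd] at hsp
                rw [if_neg hd]
                injection hsp with h1 h2
                subst h1; subst h2
                rw [pureH]
                cases hk : trans.get? (String.ofList [d]) with
                | none => simp
                | some nw =>
                  dsimp only
                  rw [ih r.length (by simp [hn]) r rfl, hsp2]
                  simp [String.append_assoc]
        · rw [if_neg hc, if_neg hc]
          dsimp only
          rw [ih s'.length (by simp [hn]) s' rfl, hsp]
          dsimp only
          apply String.ext
          simp

-- ===== VERDICT (by name: the statement is the Claim_ definition above) =====
theorem evalchar_spec : Claim_equal_evalchar := by
  intro string olds news char _ _
  show evalchar string olds news char = evalchar_alt string olds news char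
  rw [evalchar]
  simp only [evalchar_alt]
  cases hch : char.toList with
  | nil =>
    have hne : ∀ a : Char, String.ofList [a] ≠ char := by
      intro a hh
      have := congrArg String.toList hh
      rw [hch] at this; simp at this
    rw [evalcharLoop_copy _ _ hne _ string.toList 0 "" rfl]
    simp [String.ofList_toList]
  | cons c cs =>
    cases cs with
    | nil =>
      have hchar : String.ofList [c] = char := by
        rw [← hch, String.ofList_toList]
      rw [← hchar]
      rw [evalcharLoop_eq_pureF (pyDictOf (olds.zip news)) c _ string.toList 0 "" rfl]
      rw [List.drop_zero, pureF_eq_pureH _ _ _ string.toList.length string.toList rfl]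
      cases hsp : pySplit1 c string.toList with
      | nil => exact absurd hsp (pySplit1_ne_nil c string.toList)
      | cons p0 rest =>
        dsimp only
        rw [hsp]
        dsimp only
        rw [partsLoop_eq_pureH _ _ rest.length rest _ rfl]
        have : (PySem.Str.join "" [String.ofList p0]) = String.ofList p0 := by
          have := join_empty_append [] (String.ofList p0)
          simpa [join_empty_nil] using this
        rw [this]
        simp
    | cons c2 cs2 =>
      have hne : ∀ a : Char, String.ofList [a] ≠ char := by
        intro a hh
        have := congrArg String.toList hh
        rw [hch] at this; simp at this
      rw [evalcharLoop_copy _ _ hne _ string.toList 0 "" rfl]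
      simp [String.ofList_toList]
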